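-- pv_equiv track=rewrite | github.com/Zeydel/Everybody-Codes | The Song of Ducks and Dragons/Quest06/Quest06_part2.py | get_possible_mentor_combinations
-- ===== SOURCE A (Python) =====
-- def get_possible_mentor_combinations(people):
--
--     # Init combinations as zero
--     combinations = 0
--
--     # Init number of seen mentors as zero
--     mentors = dict()
--
--     # For every person in the list
--     for p in people:
--
--         # If it a mentor, increment count
--         if p.isupper():
--
--             if p not in mentors:
--                 mentors[p] = 0
--
--             mentors[p] += 1
--
--         # If it a mentee, add number of seen mentors to the number
--         # of combinations
--         elif p.islower() and p.upper() in mentors: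
--             combinations += mentors[p.upper()]
--
--     # Return the number of combinations
--     return combinations
-- ===== SOURCE B (Python) =====
-- def get_possible_mentor_combinations(people):
--     # Staged index-first approach: tag, group by letter, then count per letter.
--     # Phase 1: turn each person into a (letter, is_mentor) event, dropping uncased entries.
--     events = []
--     for p in people:
--         if p.isupper():
--             events.append((p, True))
--         elif p.islower():
--             events.append((p.upper(), False))
--     # Phase 2: group the events by letter, preserving order.
--     by_letter = {}
--     for k, e in events:
--         by_letter.setdefault(k, []).append(e)
--     # Phase 3: within each letter's event list, every mentee pairs with each earlier mentor.
--     total = 0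
--     for evs in by_letter.values():
--         mentors = 0
--         for e in evs:
--             if e:
--                 mentors += 1
--             else:
--                 total += mentors
--     return total
-- ===== Notes on version B (the rewrite author's own statement) =====
-- stated objective: alternative
-- what changed: B replaces A's single interleaved pass (a running per-mentor counter charged at each mentee) with three staged passes: tag each person as a (letter, is-mentor) event, group the events into a per-letter index dict, then count mentor-before-mentee pairs independently within each letter's event list and sum.
import Mathlib
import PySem

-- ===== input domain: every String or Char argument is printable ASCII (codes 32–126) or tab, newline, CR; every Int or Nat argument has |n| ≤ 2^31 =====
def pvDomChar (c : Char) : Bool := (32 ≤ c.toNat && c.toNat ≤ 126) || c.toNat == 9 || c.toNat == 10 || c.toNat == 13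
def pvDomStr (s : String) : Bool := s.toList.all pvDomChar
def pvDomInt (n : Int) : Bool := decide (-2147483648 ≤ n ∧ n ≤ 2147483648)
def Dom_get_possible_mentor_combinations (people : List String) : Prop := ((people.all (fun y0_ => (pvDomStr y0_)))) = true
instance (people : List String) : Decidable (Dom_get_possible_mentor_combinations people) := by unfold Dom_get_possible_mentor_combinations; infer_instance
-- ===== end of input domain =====

-- B replaces A's single pass with three staged passes (tag each person as a (letter, is-mentor)
-- event, group events by letter into an index, then count mentor-before-mentee pairs per letter);
-- objective: alternative decomposition, same cost.

-- Python str.isupper()/str.islower(), ported by hand (PySem has only the Char forms):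
-- 'at least one cased character and no lower-/upper-case one'; exact on the ASCII domain,
-- where the cased characters are exactly the letters.
def pvStrIsupper (s : String) : Bool :=
  s.toList.any PySem.Chars.isupper && !(s.toList.any PySem.Chars.islower)

def pvStrIslower (s : String) : Bool :=
  s.toList.any PySem.Chars.islower && !(s.toList.any PySem.Chars.isupper)

-- ===== PORT A =====
-- loop body of A: state = (combinations, mentors dict)
def pvStepA (st : Int × PySem.Dict String Int) (p : String) : Int × PySem.Dict String Int :=
  if pvStrIsupper p then
    -- if p not in mentors: mentors[p] = 0 ; then mentors[p] += 1
    let m := if st.2.contains p then st.2 else st.2.insert p 0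
    (st.1, m.insert p (m.getD p 0 + 1))
  else if pvStrIslower p && st.2.contains (PySem.Str.upper p) then
    (st.1 + st.2.getD (PySem.Str.upper p) 0, st.2)
  else
    st

def get_possible_mentor_combinations (people : List String) : Int :=
  (people.foldl pvStepA (0, PySem.Dict.empty)).1

-- ===== PORT B =====
-- phase 1: events.append((p, True) / (p.upper(), False))
def pvPhase1 (people : List String) : List (String × Bool) :=
  people.foldl (fun acc p =>
    if pvStrIsupper p then acc ++ [(p, true)]
    else if pvStrIslower p then acc ++ [(PySem.Str.upper p, false)]
    else acc) []

-- phase 2: by_letter.setdefault(k, []).append(e)  — which is exactly d[k] = d.get(k, []) + [e]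
def pvPhase2 (events : List (String × Bool)) : PySem.Dict String (List Bool) :=
  events.foldl (fun d pe => d.modify pe.1 [] (· ++ [pe.2])) PySem.Dict.empty

-- phase 3 inner loop over one letter's events: state = (mentors, total)
def pvCountLetter (t : Int) (evs : List Bool) : Int :=
  (evs.foldl (fun st e => if e then (st.1 + 1, st.2) else (st.1, st.2 + st.1)) ((0 : Int), t)).2

def get_possible_mentor_combinations_alt (people : List String) : Int :=
  ((pvPhase2 (pvPhase1 people)).values).foldl pvCountLetter 0

-- ===== PRECONDITION & SPEC =====
def Spec_get_possible_mentor_combinations (people : List String) (out : Int) : Prop := out = get_possible_mentor_combinations_alt people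
instance (people : List String) (out : Int) : Decidable (Spec_get_possible_mentor_combinations people out) := by unfold Spec_get_possible_mentor_combinations; infer_instance

-- ===== CLAIM (what is proved, stated in full; the proofs are below) =====
def Claim_equal_get_possible_mentor_combinations : Prop := ∀ (people : List String), Dom_get_possible_mentor_combinations people → Spec_get_possible_mentor_combinations people (get_possible_mentor_combinations people)

-- ===== LEMMAS AND PROOFS =====

-- number of (mentor, later matching mentee) pairs in the people list, scanning from the head
def pvPairs : List String → Int
  | [] => 0
  | p :: r =>
    (if pvStrIsupper p then (r.countP (fun q => pvStrIslower q && PySem.Str.upper q == p) : Int) else 0)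
      + pvPairs r

-- the same quantity on the tagged event list
def pvPairsQ : List (String × Bool) → Int
  | [] => 0
  | x :: r =>
    (if x.2 then (r.countP (fun q => q.1 == x.1 && !q.2) : Int) else 0) + pvPairsQ r

-- mentor-before-mentee pairs in one letter's boolean event list, m mentors already seen
def pvPB (m : Int) : List Bool → Int
  | [] => 0
  | true :: r => pvPB (m + 1) r
  | false :: r => m + pvPB m r

def pvCTrue (v : List Bool) : Int := (v.countP id : Int)

def pvProj (evs : List (String × Bool)) (k : String) : List Bool :=
  (evs.filter (fun p => p.1 == k)).map (·.2)

def pvTag (p : String) : Option (String × Bool) :=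
  if pvStrIsupper p then some (p, true)
  else if pvStrIslower p then some (PySem.Str.upper p, false)
  else none

-- A-side loop invariant bookkeeping
def pvW (d : PySem.Dict String Int) : List String → Int
  | [] => 0
  | p :: r => (if pvStrIslower p then d.getD (PySem.Str.upper p) 0 else 0) + pvW d r

-- a string cannot be both upper- and lower-case
theorem pvStrIslower_of_isupper {p : String} (h : pvStrIsupper p = true) : pvStrIslower p = false := by
  unfold pvStrIsupper at h
  unfold pvStrIslower
  simp only [Bool.and_eq_true, Bool.not_eq_true'] at h
  simp [h.2]

-- incrementing one key's count shifts pvW by the number of matching mentees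
theorem pvW_update (r : List String) (d d' : PySem.Dict String Int) (p : String)
    (h : ∀ k, d'.getD k 0 = if k = p then d.getD k 0 + 1 else d.getD k 0) :
    pvW d' r = pvW d r + (r.countP (fun q => pvStrIslower q && PySem.Str.upper q == p) : Int) := by
  induction r with
  | nil => simp [pvW]
  | cons q r ih =>
    simp only [pvW, List.countP_cons, ih]
    by_cases hq : pvStrIslower q = true
    · rw [h (PySem.Str.upper q)]
      by_cases hm : PySem.Str.upper q = p
      · subst hm; simp [hq]; omega
      · simp [hq, hm]; omega
    · simp [hq]

theorem pvW_empty (r : List String) : pvW PySem.Dict.empty r = 0 := by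
  induction r with
  | nil => rfl
  | cons q r ih => simp [pvW, ih, PySem.Dict.getD_empty]

-- invariant of A's forward loop
theorem pvStepA_loop (l : List String) : ∀ (c : Int) (d : PySem.Dict String Int),
    (l.foldl pvStepA (c, d)).1 = c + pvPairs l + pvW d l := by
  induction l with
  | nil => intro c d; simp [pvPairs, pvW]
  | cons p r ih =>
    intro c d
    simp only [List.foldl_cons]
    by_cases hu : pvStrIsupper p = true
    · have hl := pvStrIslower_of_isupper hu
      have hstep : pvStepA (c, d) p =
          (c, (if d.contains p then d else d.insert p 0).insert p
                ((if d.contains p then d else d.insert p 0).getD p 0 + 1)) := by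
        simp [pvStepA, hu]
      rw [hstep, ih]
      have hpt : ∀ k, ((if d.contains p then d else d.insert p 0).insert p
            ((if d.contains p then d else d.insert p 0).getD p 0 + 1)).getD k 0 =
          if k = p then d.getD k 0 + 1 else d.getD k 0 := by
        intro k
        by_cases hc : d.contains p = true
        · simp only [hc, if_true]
          rw [PySem.Dict.getD_insert]
          by_cases hk : k = p <;> simp [hk]
        · simp only [Bool.not_eq_true] at hc
          simp only [hc, Bool.false_eq_true, if_false]
          rw [PySem.Dict.getD_insert, PySem.Dict.getD_insert]
          by_cases hk : k = p
          · simp [hk, PySem.Dict.getD_of_not_contains d 0 hc]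
          · simp [hk, PySem.Dict.getD_insert_of_ne d 0 0 hk]
      rw [pvW_update r _ _ p hpt]
      simp [pvPairs, pvW, hu, hl]
      omega
    · by_cases hl : pvStrIslower p = true
      · by_cases hc : d.contains (PySem.Str.upper p) = true
        · have hstep : pvStepA (c, d) p = (c + d.getD (PySem.Str.upper p) 0, d) := by
            simp [pvStepA, hu, hl, hc]
          rw [hstep, ih]
          simp [pvPairs, pvW, hu, hl]
          omega
        · simp only [Bool.not_eq_true] at hc
          have hstep : pvStepA (c, d) p = (c, d) := by
            simp [pvStepA, hu, hl, hc]
          rw [hstep, ih]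
          simp [pvPairs, pvW, hu, hl, PySem.Dict.getD_of_not_contains d 0 hc]
      · have hstep : pvStepA (c, d) p = (c, d) := by
          simp [pvStepA, hu, hl]
        rw [hstep, ih]
        simp [pvPairs, pvW, hu, hl]

-- ========== B side ==========

-- phase 1 builds the filterMap of the tagging function
theorem pvPhase1_eq (people : List String) : pvPhase1 people = people.filterMap pvTag := by
  unfold pvPhase1
  suffices h : ∀ (acc : List (String × Bool)),
      people.foldl (fun acc p =>
        if pvStrIsupper p then acc ++ [(p, true)]
        else if pvStrIslower p then acc ++ [(PySem.Str.upper p, false)]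
        else acc) acc = acc ++ people.filterMap pvTag by
    simpa using h []
  induction people with
  | nil => intro acc; simp
  | cons p r ih =>
    intro acc
    simp only [List.foldl_cons, List.filterMap_cons]
    by_cases hu : pvStrIsupper p = true
    · rw [show pvTag p = some (p, true) from by simp [pvTag, hu]]
      simp [hu, ih]
    · by_cases hl : pvStrIslower p = true
      · rw [show pvTag p = some (PySem.Str.upper p, false) from by simp [pvTag, hu, hl]]
        simp [hu, hl, ih]
      · rw [show pvTag p = none from by simp [pvTag, hu, hl]]
        simp [hu, hl, ih]

-- pairs on the tagged list = pairs on the people list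
theorem pvCountP_tag (r : List String) (k : String) :
    (r.filterMap pvTag).countP (fun q => q.1 == k && !q.2)
      = r.countP (fun q => pvStrIslower q && PySem.Str.upper q == k) := by
  induction r with
  | nil => rfl
  | cons p r ih =>
    simp only [List.filterMap_cons, List.countP_cons]
    by_cases hu : pvStrIsupper p = true
    · rw [show pvTag p = some (p, true) from by simp [pvTag, hu]]
      simp [pvStrIslower_of_isupper hu, ih]
    · by_cases hl : pvStrIslower p = true
      · rw [show pvTag p = some (PySem.Str.upper p, false) from by simp [pvTag, hu, hl]]
        simp only [List.countP_cons, ih]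
        by_cases hm : PySem.Str.upper p = k
        · simp [hm, hl]
        · have : (PySem.Str.upper p == k) = false := by simp [hm]
          simp [this, hl]
      · rw [show pvTag p = none from by simp [pvTag, hu, hl]]
        simp [hl, ih]

theorem pvPairsQ_tag (people : List String) : pvPairsQ (people.filterMap pvTag) = pvPairs people := by
  induction people with
  | nil => rfl
  | cons p r ih =>
    simp only [List.filterMap_cons, pvPairs]
    by_cases hu : pvStrIsupper p = true
    · rw [show pvTag p = some (p, true) from by simp [pvTag, hu]]
      simp only [hu, if_true, pvPairsQ, ih, pvCountP_tag]
    · by_cases hl : pvStrIslower p = true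
      · rw [show pvTag p = some (PySem.Str.upper p, false) from by simp [pvTag, hu, hl]]
        simp [hu, pvPairsQ, ih]
      · rw [show pvTag p = none from by simp [pvTag, hu, hl]]
        simp [hu, ih]

-- pvPB over an appended event
theorem pvPB_append_true (v : List Bool) : ∀ m, pvPB m (v ++ [true]) = pvPB m v := by
  induction v with
  | nil => intro m; rfl
  | cons e r ih => intro m; cases e <;> simp [pvPB, ih]

theorem pvPB_append_false (v : List Bool) : ∀ m, pvPB m (v ++ [false]) = pvPB m v + m + pvCTrue v := by
  induction v with
  | nil => intro m; simp [pvPB, pvCTrue]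
  | cons e r ih =>
    intro m
    cases e
    · simp only [List.cons_append, pvPB, ih, pvCTrue, List.countP_cons]
      simp; omega
    · simp only [List.cons_append, pvPB, ih, pvCTrue, List.countP_cons]
      simp; omega

-- the inner loop of phase 3 computes (mentors-seen, total + pairs-in-this-letter)
theorem pvCountLetter_loop (evs : List Bool) : ∀ (m t : Int),
    evs.foldl (fun st e => if e then (st.1 + 1, st.2) else (st.1, st.2 + st.1)) (m, t)
      = (m + pvCTrue evs, t + pvPB m evs) := by
  induction evs with
  | nil => intro m t; simp [pvCTrue, pvPB]
  | cons e r ih =>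
    intro m t
    cases e
    · simp only [List.foldl_cons, ih, pvCTrue, pvPB, List.countP_cons]
      simp; omega
    · simp only [List.foldl_cons, if_true, ih, pvCTrue, pvPB, List.countP_cons]
      simp only [Prod.mk.injEq]
      refine ⟨?_, trivial⟩
      simp
      omega

theorem pvCountLetter_eq (t : Int) (evs : List Bool) : pvCountLetter t evs = t + pvPB 0 evs := by
  unfold pvCountLetter
  rw [pvCountLetter_loop]

-- the outer loop of phase 3 sums the per-letter counts
theorem pvPhase3_sum (vs : List (List Bool)) : ∀ (t : Int),
    vs.foldl pvCountLetter t = t + (vs.map (fun v => pvPB 0 v)).sum := by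
  induction vs with
  | nil => intro t; simp
  | cons v r ih =>
    intro t
    simp only [List.foldl_cons, List.map_cons, List.sum_cons, ih, pvCountLetter_eq]
    omega

-- number of mentor events of letter k = pvCTrue of the projection
theorem pvCTrue_proj (evs : List (String × Bool)) (k : String) :
    pvCTrue (pvProj evs k) = (evs.countP (fun q => q.1 == k && q.2) : Int) := by
  unfold pvCTrue pvProj
  rw [List.countP_map, List.countP_filter]
  congr 1
  apply List.countP_congr
  intro q _
  simp [Function.comp]
  tauto

-- projection of an appended event
theorem pvProj_append (evs : List (String × Bool)) (k : String) (x : String × Bool) :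
    pvProj (evs ++ [x]) k = pvProj evs k ++ (if x.1 == k then [x.2] else []) := by
  unfold pvProj
  rw [List.filter_append]
  by_cases h : (x.1 == k) = true <;> simp [List.filter, h]

-- a key absent from the firsts has an empty projection
theorem pvProj_of_not_mem (evs : List (String × Bool)) (k : String)
    (h : k ∉ evs.map (·.1)) : pvProj evs k = [] := by
  unfold pvProj
  have : evs.filter (fun p => p.1 == k) = [] := by
    apply List.filter_eq_nil_iff.mpr
    intro p hp hk
    exact h (List.mem_map.mpr ⟨p, hp, by simpa using hk⟩)
  simp [this]

-- pvPairsQ over an appended event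
theorem pvPairsQ_append (es : List (String × Bool)) (k : String) (e : Bool) :
    pvPairsQ (es ++ [(k, e)]) = pvPairsQ es
      + (if e then 0 else (es.countP (fun q => q.1 == k && q.2) : Int)) := by
  induction es with
  | nil =>
    cases e <;> simp [pvPairsQ]
  | cons x r ih =>
    simp only [List.cons_append, pvPairsQ, ih, List.countP_append, List.countP_cons,
      List.countP_nil]
    by_cases hx : x.2 = true
    · by_cases hk : x.1 = k
      · subst hk
        cases e
        · simp [hx]
          omega
        · simp [hx]
      · have hk2 : ¬ k = x.1 := fun h => hk h.symm
        cases e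
        · simp [hx, hk, hk2]
          omega
        · simp [hx]
    · have hx' : x.2 = false := by revert hx; cases x.2 <;> simp
      cases e <;> simp [hx']

-- replacing one entry of a nodup key list changes the sum by the change at that key
theorem pvSum_update (ks : List String) (hnd : ks.Nodup) (k : String) (hk : k ∈ ks)
    (f f' : String → Int) (hoff : ∀ j ∈ ks, j ≠ k → f' j = f j) :
    (ks.map f').sum = (ks.map f).sum + f' k - f k := by
  induction ks with
  | nil => cases hk
  | cons j r ih =>
    rcases List.mem_cons.mp hk with h | h
    · subst h
      have : r.map f' = r.map f := by
        apply List.map_congr_left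
        intro x hx
        exact hoff x (List.mem_cons_of_mem _ hx) (fun hxj => (List.nodup_cons.mp hnd).1 (hxj ▸ hx))
      simp [this]; omega
    · have hj : j ≠ k := fun hjk => (List.nodup_cons.mp hnd).1 (hjk ▸ h)
      have hfj : f' j = f j := hoff j (List.mem_cons_self) hj
      have := ih (List.nodup_cons.mp hnd).2 h (fun x hx hxk => hoff x (List.mem_cons_of_mem _ hx) hxk)
      simp only [List.map_cons, List.sum_cons, hfj, this]
      omega

-- MAIN LEMMA: summing per-letter pair counts over the distinct keys gives the global pair count
theorem pvSum_keys (evs : List (String × Bool)) :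
    ((PySem.Set.ofList (evs.map (·.1))).map (fun k => pvPB 0 (pvProj evs k))).sum
      = pvPairsQ evs := by
  induction evs using List.reverseRecOn with
  | nil => rfl
  | append_singleton es x ih =>
    obtain ⟨k, e⟩ := x
    rw [pvPairsQ_append]
    have hproj_ne : ∀ j, j ≠ k → pvProj (es ++ [(k, e)]) j = pvProj es j := by
      intro j hj
      rw [pvProj_append]
      have hb : ((k, e).1 == j) = false := by
        apply beq_eq_false_iff_ne.mpr
        exact fun h => hj h.symm
      simp [hb]
    have hproj_k : pvProj (es ++ [(k, e)]) k = pvProj es k ++ [e] := by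
      rw [pvProj_append]; simp
    simp only [List.map_append, List.map_cons, List.map_nil]
    rw [PySem.Set.ofList_append_singleton]
    by_cases hk : k ∈ es.map (·.1)
    · have hmem : k ∈ PySem.Set.ofList (es.map (·.1)) := (PySem.Set.mem_ofList _ _).mpr hk
      rw [PySem.Set.add_of_mem hmem]
      rw [pvSum_update (PySem.Set.ofList (es.map (·.1))) (PySem.Set.nodup_ofList _) k hmem
        (fun j => pvPB 0 (pvProj es j)) (fun j => pvPB 0 (pvProj (es ++ [(k, e)]) j))
        (by
          intro j _ hj
          show pvPB 0 (pvProj (es ++ [(k, e)]) j) = pvPB 0 (pvProj es j)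
          rw [hproj_ne j hj])]
      simp only [hproj_k]
      rw [← ih]
      cases e
      · rw [pvPB_append_false, pvCTrue_proj]
        simp
        omega
      · rw [pvPB_append_true]
        simp
    · have hmem : k ∉ PySem.Set.ofList (es.map (·.1)) := fun h => hk ((PySem.Set.mem_ofList _ _).mp h)
      rw [PySem.Set.add_of_not_mem hmem]
      have hcnt : es.countP (fun q => q.1 == k && q.2) = 0 := by
        apply List.countP_eq_zero.mpr
        intro q hq
        have hb : (q.1 == k) = false := by
          apply beq_eq_false_iff_ne.mpr
          intro hc
          exact hk (List.mem_map.mpr ⟨q, hq, hc⟩)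
        simp [hb]
      have hsame : ∀ j ∈ PySem.Set.ofList (es.map (·.1)),
          pvPB 0 (pvProj (es ++ [(k, e)]) j) = pvPB 0 (pvProj es j) := by
        intro j hj
        have hjk : j ≠ k := fun h => hmem (h ▸ hj)
        rw [hproj_ne j hjk]
      rw [List.map_append, List.sum_append, List.map_congr_left hsame, ih]
      simp only [List.map_cons, List.map_nil, List.sum_cons, List.sum_nil]
      rw [hproj_k, pvProj_of_not_mem es k hk]
      cases e <;> simp [pvPB, hcnt]

-- characterisation of phase 2's dict
theorem pvPhase2_getD (evs : List (String × Bool)) (k : String) :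
    (pvPhase2 evs).getD k [] = pvProj evs k := by
  unfold pvPhase2 pvProj
  rw [PySem.Dict.getD_foldl_modify_append]
  simp [PySem.Dict.getD_empty]

theorem pvPhase2_keys (evs : List (String × Bool)) :
    (pvPhase2 evs).keys = PySem.Set.ofList (evs.map (·.1)) := by
  unfold pvPhase2
  rw [PySem.Dict.keys_foldl_modify_key]
  simp [PySem.Dict.keys_empty, PySem.Set.update_nil_left]

theorem pvPhase2_nodup (evs : List (String × Bool)) : (pvPhase2 evs).keys.Nodup := by
  rw [pvPhase2_keys]
  exact PySem.Set.nodup_ofList _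

-- ===== VERDICT (by name: the statement is the Claim_ definition above) =====
theorem get_possible_mentor_combinations_spec : Claim_equal_get_possible_mentor_combinations := by
  intro people _
  unfold Spec_get_possible_mentor_combinations get_possible_mentor_combinations get_possible_mentor_combinations_alt
  rw [pvStepA_loop, pvW_empty, pvPhase3_sum,
    PySem.Dict.values_eq_map_keys (pvPhase2 (pvPhase1 people)) (pvPhase2_nodup _) [],
    List.map_map]
  have : ((pvPhase2 (pvPhase1 people)).keys.map
      (fun k => pvPB 0 ((pvPhase2 (pvPhase1 people)).getD k []))).sum
      = pvPairsQ (pvPhase1 people) := by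
    rw [pvPhase2_keys]
    rw [← pvSum_keys (pvPhase1 people)]
    congr 1
    apply List.map_congr_left
    intro k _
    rw [pvPhase2_getD]
  simp only [Function.comp_def]
  rw [this, pvPhase1_eq, pvPairsQ_tag]
  omega
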